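-- pv_equiv track=rewrite | github.com/Srishanth-023/LeetCode | p1295_find_numbers_with_even_number_of_digits.py | findNumbers
-- ===== SOURCE A (Python) =====
-- def findNumbers(nums):
--     """
--     :type nums: List[int]
--     :rtype: int
--     """
--     number_of_digits = []
--     even_number_digits = 0
--
--     for num in nums:
--         num = abs(num)
--         count = 0
--
--         if num == 0:
--             count = 1
--         else:
--             while num > 0:
--                 num //= 10
--                 count += 1
--
--         number_of_digits.append(count)
--
--     for num in number_of_digits:
--         if num % 2 == 0:
--             even_number_digits += 1
--         else:
--             pass
--
--     return even_number_digits
-- ===== SOURCE B (Python) =====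
-- def findNumbers(nums):
--     return sum(1 for num in nums if len(str(abs(num))) % 2 == 0)
-- ===== Notes on version B (the rewrite author's own statement) =====
-- stated objective: idiomatic
-- what changed: Replaces the per-element while-loop of repeated integer division plus an intermediate digit-count list and a second counting pass with a single-pass comprehension that takes each number's digit count as len(str(abs(num))).
import Mathlib
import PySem

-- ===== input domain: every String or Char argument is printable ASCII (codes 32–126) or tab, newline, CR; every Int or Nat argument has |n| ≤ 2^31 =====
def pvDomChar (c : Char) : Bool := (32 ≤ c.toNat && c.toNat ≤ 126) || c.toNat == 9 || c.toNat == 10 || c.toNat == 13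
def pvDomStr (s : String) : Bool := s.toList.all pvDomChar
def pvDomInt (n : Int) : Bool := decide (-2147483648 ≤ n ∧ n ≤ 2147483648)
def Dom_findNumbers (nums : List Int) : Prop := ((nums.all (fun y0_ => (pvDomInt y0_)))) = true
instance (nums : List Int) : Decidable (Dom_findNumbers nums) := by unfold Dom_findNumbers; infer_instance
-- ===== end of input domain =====

-- B replaces A's division while-loop and intermediate digit-count list by one pass taking
-- each digit count as len(str(abs(num))) (same cost; more idiomatic).

-- ===== PORT A =====
-- A's `while num > 0: num //= 10; count += 1` loop (count accumulated as the recursion depth)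
def pvCountLoop (n : Int) : Int :=
  if h : 0 < n then pvCountLoop (PySem.Int.floordiv n 10) + 1 else 0
termination_by n.toNat
decreasing_by
  simp only [PySem.Int.floordiv]
  have h10 : Int.fdiv n 10 = n / 10 := Int.fdiv_eq_ediv_of_nonneg n (by norm_num)
  rw [h10]
  omega

def findNumbers (nums : List Int) : Int :=
  let numberOfDigits : List Int := nums.foldl (fun acc num =>
    let a := |num|
    let count : Int := if a == 0 then 1 else pvCountLoop a
    acc ++ [count]) []
  numberOfDigits.foldl (fun e c => if PySem.Int.mod c 2 == 0 then e + 1 else e) 0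

-- ===== PORT B =====
def findNumbers_alt (nums : List Int) : Int :=
  nums.foldl (fun s num =>
    if PySem.Int.mod (PySem.Str.len (PySem.Int.toStr |num|)) 2 == 0 then s + 1 else s) 0

-- ===== PRECONDITION & SPEC =====
def Spec_findNumbers (nums : List Int) (out : Int) : Prop := out = findNumbers_alt nums
instance (nums : List Int) (out : Int) : Decidable (Spec_findNumbers nums out) := by unfold Spec_findNumbers; infer_instance

-- ===== CLAIM (what is proved, stated in full; the proofs are below) =====
def Claim_equal_findNumbers : Prop := ∀ (nums : List Int), Dom_findNumbers nums → Spec_findNumbers nums (findNumbers nums)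

-- ===== LEMMAS AND PROOFS =====

-- number of decimal digits of a natural number (1 for 0), matching Nat.toDigits' length
def pvLnat (n : Nat) : Nat :=
  if h : n / 10 = 0 then 1 else pvLnat (n / 10) + 1
termination_by n
decreasing_by exact Nat.div_lt_self (by omega) (by norm_num)

lemma pvLnat_eq (n : Nat) : pvLnat n = if n / 10 = 0 then 1 else pvLnat (n / 10) + 1 := by
  rw [pvLnat]
  split_ifs <;> rfl

lemma toDigitsCore_len : ∀ (f n : Nat) (l : List Char), n < f →
    (Nat.toDigitsCore 10 f n l).length = pvLnat n + l.length := by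
  intro f
  induction f with
  | zero => intro n l h; omega
  | succ f ih =>
    intro n l h
    rw [Nat.toDigitsCore]
    by_cases h0 : n / 10 = 0
    · simp only [h0, if_pos]
      rw [pvLnat_eq n, if_pos h0]
      simp
      omega
    · simp only [h0, ite_false]
      have hn : 0 < n := by
        by_contra hc
        have : n = 0 := by omega
        simp [this] at h0
      have hlt : n / 10 < f := by
        have := Nat.div_lt_self hn (by norm_num : (1:Nat) < 10)
        omega
      rw [ih (n / 10) (Nat.digitChar (n % 10) :: l) hlt]
      rw [pvLnat_eq n, if_neg h0]
      simp
      omega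

lemma toDigits_len (n : Nat) : (Nat.toDigits 10 n).length = pvLnat n := by
  rw [Nat.toDigits]
  have := toDigitsCore_len (n + 1) n [] (by omega)
  simpa using this

lemma countLoop_eq_pvLnat (m : Int) (hm : 0 < m) : pvCountLoop m = (pvLnat m.toNat : Int) := by
  have hwf : ∀ k : Nat, ∀ m : Int, m.toNat = k → 0 < m → pvCountLoop m = (pvLnat m.toNat : Int) := by
    intro k
    induction k using Nat.strong_induction_on with
    | _ k ih =>
      intro m hk hm
      rw [pvCountLoop, dif_pos hm]
      have hfd : PySem.Int.floordiv m 10 = m / 10 := by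
        simp only [PySem.Int.floordiv]
        exact Int.fdiv_eq_ediv_of_nonneg m (by norm_num)
      by_cases h0 : m.toNat / 10 = 0
      · -- m < 10, so m / 10 = 0 and the inner call returns 0
        have hm10 : m / 10 = 0 := by omega
        rw [hfd, hm10]
        rw [pvCountLoop, dif_neg (by omega : ¬ (0:Int) < 0)]
        rw [pvLnat_eq m.toNat, if_pos h0]
        simp
      · have hq : 0 < m / 10 := by omega
        have hqk : (m / 10).toNat < k := by omega
        rw [hfd, ih (m / 10).toNat (by omega) (m / 10) rfl hq]
        rw [pvLnat_eq m.toNat, if_neg h0]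
        have : (m / 10).toNat = m.toNat / 10 := by omega
        rw [this]
        push_cast
        ring
  exact hwf m.toNat m rfl hm

-- per-element bridge: len(str(abs(num))) equals A's digit count
lemma strlen_eq_count (num : Int) :
    PySem.Str.len (PySem.Int.toStr |num|) =
      (if |num| == 0 then (1 : Int) else pvCountLoop |num|) := by
  have habs : (0:Int) ≤ |num| := abs_nonneg num
  simp only [PySem.Str.len, PySem.Int.toStr, PySem.Int.toChars,
    if_neg (by omega : ¬ |num| < 0)]
  rw [String.toList_ofList]
  rw [toDigits_len]
  by_cases h0 : |num| = 0
  · simp [h0, pvLnat_eq]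
  · rw [if_neg (by simpa using h0)]
    rw [countLoop_eq_pvLnat |num| (by omega)]

lemma fold_append_map (nums : List Int) (acc : List Int) :
    nums.foldl (fun acc num =>
      let a := |num|
      let count : Int := if a == 0 then 1 else pvCountLoop a
      acc ++ [count]) acc
    = acc ++ nums.map (fun num => if |num| == 0 then (1:Int) else pvCountLoop |num|) := by
  induction nums generalizing acc with
  | nil => simp
  | cons x xs ih =>
    rw [List.foldl_cons, ih]
    simp

-- ===== VERDICT (by name: the statement is the Claim_ definition above) =====
theorem findNumbers_spec : Claim_equal_findNumbers := by
  intro nums _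
  unfold Spec_findNumbers findNumbers findNumbers_alt
  rw [fold_append_map nums [], List.nil_append, List.foldl_map]
  have hstep : (fun (s num : Int) =>
      if PySem.Int.mod (PySem.Str.len (PySem.Int.toStr |num|)) 2 == 0 then s + 1 else s)
    = (fun (s num : Int) =>
      if PySem.Int.mod (if |num| == 0 then (1:Int) else pvCountLoop |num|) 2 == 0 then s + 1 else s) := by
    funext s num
    rw [strlen_eq_count]
  rw [hstep]
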